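-- pv_equiv track=rewrite | github.com/skfl/DSTUVIIM-21 | out/production/DSTU2/ISArch/Lab3/PointOnPlot.py | check_if_fits
-- ===== SOURCE A (Python) =====
-- def check_if_fits(x, y):
--     x = int(x)
--     y = int(y)
--     V = False
--     if x == 0:
--         for i in range(-100, 101, 50):
--             if y == i:
--                 V = True
--                 return V
--     if y == 0:
--         for i in range(-100, 101, 50):
--             if x == i:
--                 V = True
--                 return V
--     return V
-- ===== SOURCE B (Python) =====
-- def check_if_fits(x, y):
--     x = int(x)
--     y = int(y)
--     if x == 0:
--         return y % 50 == 0 and -100 <= y <= 100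
--     if y == 0:
--         return x % 50 == 0 and -100 <= x <= 100
--     return False
-- ===== Notes on version B (the rewrite author's own statement) =====
-- stated objective: idiomatic
-- what changed: Replaced the two scans over the fixed tick list range(-100,101,50) with closed-form divisibility-by-50 plus bounds tests, returning directly from each axis branch.
import Mathlib
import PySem

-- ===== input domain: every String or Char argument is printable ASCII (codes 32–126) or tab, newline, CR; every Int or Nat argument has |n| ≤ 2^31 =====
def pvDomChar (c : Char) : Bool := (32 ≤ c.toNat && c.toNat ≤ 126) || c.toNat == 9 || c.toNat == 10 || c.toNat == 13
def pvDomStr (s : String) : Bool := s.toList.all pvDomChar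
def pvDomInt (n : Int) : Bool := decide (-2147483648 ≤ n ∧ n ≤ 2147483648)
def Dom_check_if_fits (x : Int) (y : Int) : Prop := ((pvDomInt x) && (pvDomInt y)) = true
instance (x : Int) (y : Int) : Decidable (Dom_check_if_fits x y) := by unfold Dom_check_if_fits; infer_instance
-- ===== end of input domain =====

-- B replaces A's two scans over the fixed tick list range(-100,101,50) with
-- closed-form divisibility-by-50 plus bounds tests (idiomatic, same O(1) cost).


-- ===== PORT A =====
-- the loop 'for i in range(-100,101,50): if y == i: return True' = any over the range;
-- if no early return, execution falls through to the next statement with V still False.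
def check_if_fits (x : Int) (y : Int) : Bool :=
  -- V = False
  if x == 0 ∧ (PySem.List.pyRange (-100) 101 50).any (fun i => y == i) then
    true
  else if y == 0 ∧ (PySem.List.pyRange (-100) 101 50).any (fun i => x == i) then
    true
  else
    false

-- ===== PORT B =====
def check_if_fits_alt (x : Int) (y : Int) : Bool :=
  if x == 0 then
    decide (PySem.Int.mod y 50 = 0 ∧ -100 ≤ y ∧ y ≤ 100)
  else if y == 0 then
    decide (PySem.Int.mod x 50 = 0 ∧ -100 ≤ x ∧ x ≤ 100)
  else
    false

-- ===== PRECONDITION & SPEC =====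
def Spec_check_if_fits (x : Int) (y : Int) (out : Bool) : Prop := out = check_if_fits_alt x y
instance (x : Int) (y : Int) (out : Bool) : Decidable (Spec_check_if_fits x y out) := by unfold Spec_check_if_fits; infer_instance

-- ===== CLAIM (what is proved, stated in full; the proofs are below) =====
def Claim_equal_check_if_fits : Prop := ∀ (x : Int) (y : Int), Dom_check_if_fits x y → Spec_check_if_fits x y (check_if_fits x y)

-- ===== LEMMAS AND PROOFS =====
theorem pvTicks : PySem.List.pyRange (-100) 101 50 = [-100, -50, 0, 50, 100] := by decide

theorem pvTickIff (z : Int) :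
    ([-100, -50, 0, 50, 100].any (fun i => z == i)) =
      decide (PySem.Int.mod z 50 = 0 ∧ -100 ≤ z ∧ z ≤ 100) := by
  have hfm : Int.fmod z 50 = z % 50 := by rw [Int.fmod_eq_emod]; norm_num
  simp only [List.any_cons, List.any_nil, PySem.Int.mod, hfm, Bool.or_false]
  rw [Bool.eq_iff_iff]
  simp only [Bool.or_eq_true, beq_iff_eq, decide_eq_true_eq]
  omega

-- ===== VERDICT (by name: the statement is the Claim_ definition above) =====
theorem check_if_fits_spec : Claim_equal_check_if_fits := by
  intro x y _
  unfold Spec_check_if_fits check_if_fits check_if_fits_alt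
  rw [pvTicks]
  by_cases hx : x = 0
  · subst hx
    by_cases hy : y = 0
    · subst hy; decide
    · simp only [beq_self_eq_true, true_and, if_true, hy, beq_iff_eq, if_false,
        false_and]
      rw [pvTickIff]; simp
  · by_cases hy : y = 0
    · subst hy
      simp only [beq_iff_eq, hx, false_and, if_false, beq_self_eq_true,
        true_and, if_true]
      rw [pvTickIff]; simp
    · simp only [beq_iff_eq, hx, hy, false_and, if_false]
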